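-- pv_equiv track=rewrite | github.com/kshkdh18/Chicken-Dinner | blackbox/simple-rag-server.py | apply_naive_guardrail
-- ===== SOURCE A (Python) =====
-- def apply_naive_guardrail(user_message: str) -> str | None:
--     """
--     아주 단순한 키워드 기반 가드레일.
--     레드티밍 시나리오에서 보안 로직 유무에 따른 차이를 확인하기 위한 용도입니다.
--     """
--     lowered = user_message.lower()
--     blocked_markers = [
--         "ignore previous instructions",
--         "reveal the system prompt",
--         "print the raw documents",
--         "verbatim",
--         "secrets.txt",
--         "policy.txt",
--     ]
--
--     if any(marker in lowered for marker in blocked_markers):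
--         return "요청을 처리할 수 없습니다. 문서 원문이나 시스템 보안 정책에 관한 요청은 거부됩니다."
--     return None
-- ===== SOURCE B (Python) =====
-- _BLOCKED_MARKERS = (
--     "ignore previous instructions",
--     "reveal the system prompt",
--     "print the raw documents",
--     "verbatim",
--     "secrets.txt",
--     "policy.txt",
-- )
--
-- _REJECTION = "요청을 처리할 수 없습니다. 문서 원문이나 시스템 보안 정책에 관한 요청은 거부됩니다."
--
--
-- def apply_naive_guardrail(user_message: str) -> str | None:
--     # Single left-to-right pass: at each position, check whether some
--     # blocked marker starts there, instead of k separate substring scans.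
--     lowered = user_message.lower()
--     for i in range(len(lowered) + 1):
--         for marker in _BLOCKED_MARKERS:
--             if lowered.startswith(marker, i):
--                 return _REJECTION
--     return None
-- ===== Notes on version B (the rewrite author's own statement) =====
-- stated objective: alternative
-- what changed: Replaces A's six independent whole-string substring scans (one per blocked marker) with a single left-to-right pass over the positions of the lowered message, testing each marker as a prefix at the current position.
import Mathlib
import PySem

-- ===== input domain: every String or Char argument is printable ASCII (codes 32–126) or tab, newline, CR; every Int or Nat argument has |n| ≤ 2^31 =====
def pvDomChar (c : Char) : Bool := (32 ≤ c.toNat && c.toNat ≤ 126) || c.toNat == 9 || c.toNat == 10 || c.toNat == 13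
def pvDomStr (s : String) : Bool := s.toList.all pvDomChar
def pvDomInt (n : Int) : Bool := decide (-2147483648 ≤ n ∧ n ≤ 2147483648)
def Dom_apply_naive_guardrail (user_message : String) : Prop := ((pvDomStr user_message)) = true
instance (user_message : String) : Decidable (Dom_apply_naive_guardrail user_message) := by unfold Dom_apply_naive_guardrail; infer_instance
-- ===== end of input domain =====

-- B replaces A's six independent substring scans by one left-to-right pass over
-- the positions of the lowered message, testing each marker as a prefix there (objective: alternative).

-- ===== PORT A =====
def blockedMarkers : List String :=
  [ "ignore previous instructions",
    "reveal the system prompt",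
    "print the raw documents",
    "verbatim",
    "secrets.txt",
    "policy.txt" ]

def rejectionMsg : String :=
  "요청을 처리할 수 없습니다. 문서 원문이나 시스템 보안 정책에 관한 요청은 거부됩니다."

def apply_naive_guardrail (user_message : String) : Option String :=
  let lowered := PySem.Str.lower user_message
  if blockedMarkers.any (fun marker => PySem.Str.isIn marker lowered) then
    some rejectionMsg
  else
    none

-- ===== PORT B =====
def blockedMarkersL : List (List Char) := blockedMarkers.map String.toList

-- one pass over the suffixes of the lowered message (position i ↦ suffix s.drop i);
-- 'lowered.startswith(marker, i)' is 'marker is a prefix of the i-th suffix'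
def guardScan : List Char → Bool
  | [] => blockedMarkersL.any (fun m => PySem.Chars.startswith [] m)
  | c :: t =>
      blockedMarkersL.any (fun m => PySem.Chars.startswith (c :: t) m) || guardScan t

def apply_naive_guardrail_alt (user_message : String) : Option String :=
  let lowered := PySem.Str.lower user_message
  if guardScan lowered.toList then some rejectionMsg else none

-- ===== PRECONDITION & SPEC =====
def Spec_apply_naive_guardrail (user_message : String) (out : Option String) : Prop := out = apply_naive_guardrail_alt user_message
instance (user_message : String) (out : Option String) : Decidable (Spec_apply_naive_guardrail user_message out) := by unfold Spec_apply_naive_guardrail; infer_instance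

-- ===== CLAIM (what is proved, stated in full; the proofs are below) =====
def Claim_equal_apply_naive_guardrail : Prop := ∀ (user_message : String), Dom_apply_naive_guardrail user_message → Spec_apply_naive_guardrail user_message (apply_naive_guardrail user_message)

-- ===== LEMMAS AND PROOFS =====

theorem guardScan_eq_any_isIn (l : List Char) :
    guardScan l = blockedMarkersL.any (fun m => PySem.Chars.isIn m l) := by
  induction l with
  | nil =>
      rw [guardScan, Bool.eq_iff_iff]
      simp only [List.any_eq_true, PySem.Chars.startswith_iff,
        PySem.Chars.isIn_iff_infix, List.prefix_nil, List.infix_nil]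
  | cons c t ih =>
      rw [guardScan, ih, Bool.eq_iff_iff]
      simp only [Bool.or_eq_true, List.any_eq_true, PySem.Chars.startswith_iff,
        PySem.Chars.isIn_iff_infix, List.infix_cons_iff]
      constructor
      · rintro (⟨m, hm, h⟩ | ⟨m, hm, h⟩)
        · exact ⟨m, hm, Or.inl h⟩
        · exact ⟨m, hm, Or.inr h⟩
      · rintro ⟨m, hm, h | h⟩
        · exact Or.inl ⟨m, hm, h⟩
        · exact Or.inr ⟨m, hm, h⟩

theorem cond_eq (s : String) :
    blockedMarkers.any (fun marker => PySem.Str.isIn marker s) = guardScan s.toList := by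
  rw [guardScan_eq_any_isIn]
  simp only [blockedMarkersL, List.any_map, PySem.Str.isIn]
  rfl

-- ===== VERDICT (by name: the statement is the Claim_ definition above) =====
theorem apply_naive_guardrail_spec : Claim_equal_apply_naive_guardrail := by
  intro um _
  unfold Spec_apply_naive_guardrail apply_naive_guardrail apply_naive_guardrail_alt
  simp only [cond_eq]
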